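-- pv_equiv track=rewrite | github.com/sonyasergeevass/Hash-Table | tests/methods_of_hash.py | hash_fun_additive
-- ===== SOURCE A (Python) =====
-- def hash_fun_additive(key, size):
--     summ = 0
--     nkey = key
--     while nkey > 0:
--         ost = nkey % 10
--         summ += ost
--         nkey //= 10
--     return summ % size
-- ===== SOURCE B (Python) =====
-- def hash_fun_additive(key, size):
--     if key <= 0:
--         return 0
--     return sum(ord(c) - ord('0') for c in str(key)) % size
-- ===== Notes on version B (the rewrite author's own statement) =====
-- stated objective: idiomatic
-- what changed: B computes the digit sum by iterating over the characters of str(key) (with a guard returning 0 for non-positive keys, which is what A's while-loop yields there) instead of A's arithmetic digit-peeling loop with % and //.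
import Mathlib
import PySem

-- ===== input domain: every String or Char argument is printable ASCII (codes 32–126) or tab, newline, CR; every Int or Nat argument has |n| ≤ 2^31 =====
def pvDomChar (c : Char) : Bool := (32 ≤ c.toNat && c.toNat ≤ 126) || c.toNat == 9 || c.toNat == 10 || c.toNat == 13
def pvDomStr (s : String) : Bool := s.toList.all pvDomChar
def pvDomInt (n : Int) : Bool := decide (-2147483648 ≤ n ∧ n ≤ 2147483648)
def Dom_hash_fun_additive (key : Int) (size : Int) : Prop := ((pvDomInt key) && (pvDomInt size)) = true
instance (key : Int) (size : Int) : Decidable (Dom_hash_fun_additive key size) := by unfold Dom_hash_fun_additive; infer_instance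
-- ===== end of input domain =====

-- B replaces A's arithmetic digit-peeling loop by an iteration over the characters of
-- str(key) (idiomatic; same cost). Guard for key ≤ 0 returns 0, which is A's value there.

-- ===== PORT A =====
-- the while-loop of A: state (summ, nkey), runs while nkey > 0
def pvLoopA (summ : Int) (nkey : Int) : Int :=
  if h : 0 < nkey then
    pvLoopA (summ + PySem.Int.mod nkey 10) (PySem.Int.floordiv nkey 10)
  else summ
termination_by nkey.toNat
decreasing_by
  have h10 : PySem.Int.floordiv nkey 10 = nkey / 10 :=
    PySem.Int.floordiv_eq_ediv_of_pos (by norm_num)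
  rw [h10]; omega

def hash_fun_additive (key : Int) (size : Int) : Int :=
  PySem.Int.mod (pvLoopA 0 key) size

-- ===== PORT B =====
def hash_fun_additive_alt (key : Int) (size : Int) : Int :=
  if key ≤ 0 then 0
  else
    PySem.Int.mod
      (((PySem.Int.toStr key).toList.map (fun c => (c.toNat : Int) - 48)).sum) size

-- ===== PRECONDITION & SPEC =====
-- Pre_ excludes exactly size = 0, where A's final 'summ % size' raises ZeroDivisionError.
def Pre_hash_fun_additive (key : Int) (size : Int) : Prop := size ≠ 0
instance (key : Int) (size : Int) : Decidable (Pre_hash_fun_additive key size) := by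
  unfold Pre_hash_fun_additive; infer_instance
def pvWitness_hash_fun_additive : Int × Int := (1234, 7)

def Spec_hash_fun_additive (key : Int) (size : Int) (out : Int) : Prop :=
  out = hash_fun_additive_alt key size
instance (key : Int) (size : Int) (out : Int) : Decidable (Spec_hash_fun_additive key size out) := by
  unfold Spec_hash_fun_additive; infer_instance

-- ===== CLAIM (what is proved, stated in full; the proofs are below) =====
def Claim_equal_hash_fun_additive : Prop := ∀ (key : Int) (size : Int),
  Dom_hash_fun_additive key size → Pre_hash_fun_additive key size →
  Spec_hash_fun_additive key size (hash_fun_additive key size)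

-- ===== LEMMAS AND PROOFS =====

-- A's loop computes the decimal digit sum (on nonnegative input).
theorem pvLoopA_eq_digitSum (m : Nat) : ∀ summ : Int,
    pvLoopA summ (m : Int) = summ + ((Nat.digits 10 m).sum : Int) := by
  induction m using Nat.strong_induction_on with
  | _ m ih =>
    intro summ
    rw [pvLoopA]
    by_cases hm : 0 < m
    · rw [dif_pos (by exact_mod_cast hm)]
      have hmod : PySem.Int.mod (m : Int) 10 = ((m % 10 : Nat) : Int) := by
        exact_mod_cast PySem.Int.mod_natCast m 10
      have hdiv : PySem.Int.floordiv (m : Int) 10 = ((m / 10 : Nat) : Int) := by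
        exact_mod_cast PySem.Int.floordiv_natCast m 10
      rw [hmod, hdiv, ih (m / 10) (Nat.div_lt_self hm (by norm_num))]
      rw [Nat.digits_def' (by norm_num : 1 < 10) hm]
      simp only [List.map_cons, List.sum_cons]
      push_cast; ring
    · have hm0 : m = 0 := by omega
      subst hm0
      rw [dif_neg (by norm_num)]
      simp

-- value of the char-to-digit map on Nat.digitChar of a digit
theorem pvDigitChar_val (d : Nat) (hd : d < 10) :
    ((Nat.digitChar d).toNat : Int) - 48 = (d : Int) := by
  interval_cases d <;> decide

-- the char-wise sum over toDigitsCore equals the digit sum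
theorem pvTdcSum : ∀ (f n : Nat) (acc : List Char), n < f →
    ((Nat.toDigitsCore 10 f n acc).map (fun c => (c.toNat : Int) - 48)).sum
      = ((Nat.digits 10 n).sum : Int)
        + ((acc.map (fun c => (c.toNat : Int) - 48)).sum) := by
  intro f
  induction f with
  | zero => intro n acc h; omega
  | succ f ih =>
    intro n acc hn
    rw [Nat.toDigitsCore]
    by_cases h0 : n / 10 = 0
    · rw [if_pos h0]
      by_cases hz : n = 0
      · subst hz; simp; decide
      · have hn10 : n < 10 := by
          rcases Nat.lt_or_ge n 10 with h | h
          · exact h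
          · exact absurd h0 (by have := Nat.div_le_div_right (c := 10) h; omega)
        rw [Nat.digits_def' (by norm_num : 1 < 10) (Nat.pos_of_ne_zero hz), h0]
        simp [pvDigitChar_val (n % 10) (Nat.mod_lt n (by norm_num))]
    · rw [if_neg h0]
      have hlt : n / 10 < f := by
        have h1 : n / 10 < n := Nat.div_lt_self (by omega) (by norm_num)
        omega
      rw [ih (n / 10) _ hlt]
      have hpos : 0 < n := by
        by_contra h; push_neg at h
        exact h0 (by omega)
      rw [Nat.digits_def' (by norm_num : 1 < 10) hpos]
      simp [pvDigitChar_val (n % 10) (Nat.mod_lt n (by omega))]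
      push_cast; ring

-- the B-side character sum over str(key) equals the digit sum, for key > 0
theorem pvStrSum (key : Int) (hk : 0 < key) :
    ((PySem.Int.toStr key).toList.map (fun c => (c.toNat : Int) - 48)).sum
      = ((Nat.digits 10 key.toNat).sum : Int) := by
  rw [PySem.Int.toList_toStr]
  unfold PySem.Int.toChars
  rw [if_neg (by omega)]
  unfold Nat.toDigits
  rw [pvTdcSum (key.toNat + 1) key.toNat [] (Nat.lt_succ_self _)]
  simp

-- ===== VERDICT (by name: the statement is the Claim_ definition above) =====
theorem hash_fun_additive_spec : Claim_equal_hash_fun_additive := by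
  intro key size _ _
  unfold Spec_hash_fun_additive hash_fun_additive hash_fun_additive_alt
  by_cases hk : key ≤ 0
  · rw [if_pos hk, pvLoopA]
    rw [dif_neg (by omega)]
    simp [PySem.Int.mod, Int.zero_fmod]
  · rw [if_neg hk]
    push_neg at hk
    have hkey : key = (key.toNat : Int) := by omega
    rw [pvStrSum key hk]
    conv_lhs => rw [hkey]
    rw [pvLoopA_eq_digitSum key.toNat 0, zero_add]
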